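-- pv_equiv track=rewrite | github.com/TonyWu1995/google-geo-pipline | usecase/general_vpon_geo_service.py | filter_match
-- ===== SOURCE A (Python) =====
-- def filter_match(calc_result_list, name_list):
--     result = []
--     for i in range(0, len(name_list)):
--         match = [row for row in calc_result_list if
--                  row[0] == name_list[len(name_list) - i - 1] or row[0] ==
--                  name_list[len(name_list) - i - 1].split(' ')[0]]
--         if len(match) > 0:
--             result.append(match[0])
--             break
--     for i in range(0, len(name_list)):
--         match = [row for row in calc_result_list if
--                  row[0].split(' ')[0] == name_list[len(name_list) - i - 1] or row[0].split(' ')[0] ==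
--                  name_list[len(name_list) - i - 1].split(' ')[0]]
--         if len(match) > 0:
--             result.append(match[0])
--             break
--     return result[0] if len(result) > 0 else []
-- ===== SOURCE B (Python) =====
-- def filter_match(calc_result_list, name_list):
--     # Row-outer scan: score each row by the highest name_list index it matches,
--     # keep the earliest row with the strictly best score; two criteria phases.
--     def best(score):
--         best_rank, best_row = -1, []
--         for row in calc_result_list:
--             r = max((j for j, name in enumerate(name_list) if score(row, name)),
--                     default=-1)
--             if r > best_rank:
--                 best_rank, best_row = r, row
--         return best_rank, best_row
--
--     rank, row = best(lambda row, name: row[0] == name or row[0] == name.split(' ')[0])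
--     if rank >= 0:
--         return row
--     rank, row = best(lambda row, name: row[0].split(' ')[0] == name
--                      or row[0].split(' ')[0] == name.split(' ')[0])
--     if rank >= 0:
--         return row
--     return []
-- ===== Notes on version B (the rewrite author's own statement) =====
-- stated objective: alternative
-- what changed: Replaced A's name-outer nested scan (for each name, latest first, rebuild the full filtered row list and short-circuit) by a single row-outer pass per criteria phase that scores each row with the highest matching name_list index and keeps the earliest row with a strictly greater score.
import Mathlib
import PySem

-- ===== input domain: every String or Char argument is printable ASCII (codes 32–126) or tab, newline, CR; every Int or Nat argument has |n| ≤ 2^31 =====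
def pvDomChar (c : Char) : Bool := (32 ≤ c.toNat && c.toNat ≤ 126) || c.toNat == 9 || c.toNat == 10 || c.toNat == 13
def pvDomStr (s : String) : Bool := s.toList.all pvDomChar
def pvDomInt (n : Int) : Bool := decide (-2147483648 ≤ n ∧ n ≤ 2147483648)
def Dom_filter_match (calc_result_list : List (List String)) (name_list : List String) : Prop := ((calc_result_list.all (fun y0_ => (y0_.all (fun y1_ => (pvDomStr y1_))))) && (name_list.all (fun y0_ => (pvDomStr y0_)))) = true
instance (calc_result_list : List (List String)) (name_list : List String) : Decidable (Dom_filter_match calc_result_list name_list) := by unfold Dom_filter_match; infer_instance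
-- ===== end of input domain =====

-- B replaces A's name-outer nested scan (latest name first, rebuilding the filtered
-- list for every name) by a single row-outer pass per criteria phase that scores each
-- row with the highest matching name index and keeps the earliest strictly-best row
-- (objective: alternative decomposition; one pass over the rows per phase).

-- shared tiny helpers (the two Pythons spell the identical criteria expressions)
-- s.split(' ')[0]: split with explicit separator always yields a nonempty list
def firstWord (s : String) : String := ((PySem.Str.split? s " ").getD []).getD 0 ""
def cond1 (row : List String) (name : String) : Bool :=
  row.getD 0 "" == name || row.getD 0 "" == firstWord name
def cond2 (row : List String) (name : String) : Bool :=
  firstWord (row.getD 0 "") == name || firstWord (row.getD 0 "") == firstWord name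

-- ===== PORT A =====
-- one of A's two `for i in range(0, len(name_list))` loops with its break:
-- filter calc_result_list by the criterion against name_list[len - i - 1], stop at the first hit
def loopA (crl : List (List String)) (nl : List String)
    (cond : List String → String → Bool) : List Nat → Option (List String)
  | [] => none
  | i :: rest =>
      match crl.filter (fun row => cond row (nl.getD (nl.length - i - 1) "")) with
      | [] => loopA crl nl cond rest
      | r :: _ => some r

def filter_match (calc_result_list : List (List String)) (name_list : List String) : List String :=
  -- `result` holds at most one row per loop and only result[0] is returned
  match loopA calc_result_list name_list cond1 (List.range name_list.length) with
  | some r => r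
  | none =>
      match loopA calc_result_list name_list cond2 (List.range name_list.length) with
      | some r => r
      | none => []

-- ===== PORT B =====
-- max(j for j, name in enumerate(name_list) if score(row, name)), default=-1
def rankB (nl : List String) (cond : List String → String → Bool) (row : List String) : Int :=
  (PySem.List.enumerate nl).foldl
    (fun acc p => if cond row p.2 then max acc p.1 else acc) (-1)

-- running (best_rank, best_row), updated only on strictly greater rank
def bestB (crl : List (List String)) (nl : List String)
    (cond : List String → String → Bool) : Int × List String :=
  crl.foldl (fun acc row =>
    let r := rankB nl cond row
    if r > acc.1 then (r, row) else acc) (-1, [])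

def filter_match_alt (calc_result_list : List (List String)) (name_list : List String) : List String :=
  let b1 := bestB calc_result_list name_list cond1
  if b1.1 ≥ 0 then b1.2
  else
    let b2 := bestB calc_result_list name_list cond2
    if b2.1 ≥ 0 then b2.2
    else []

-- ===== PRECONDITION & SPEC =====
-- Pre_ excludes only inputs where Python A raises IndexError: an empty row while
-- name_list is nonempty makes row[0] raise in A's first list comprehension.
def Pre_filter_match (calc_result_list : List (List String)) (name_list : List String) : Prop :=
  name_list = [] ∨ ∀ row ∈ calc_result_list, row ≠ []
instance (calc_result_list : List (List String)) (name_list : List String) : Decidable (Pre_filter_match calc_result_list name_list) := by unfold Pre_filter_match; infer_instance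
def pvWitness_filter_match : List (List String) × List String := ([["a b", "1"], ["c", "2"]], ["c", "a"])

def Spec_filter_match (calc_result_list : List (List String)) (name_list : List String) (out : List String) : Prop := out = filter_match_alt calc_result_list name_list
instance (calc_result_list : List (List String)) (name_list : List String) (out : List String) : Decidable (Spec_filter_match calc_result_list name_list out) := by unfold Spec_filter_match; infer_instance

-- ===== CLAIM (what is proved, stated in full; the proofs are below) =====
def Claim_equal_filter_match : Prop := ∀ (calc_result_list : List (List String)) (name_list : List String), Dom_filter_match calc_result_list name_list → Pre_filter_match calc_result_list name_list → Spec_filter_match calc_result_list name_list (filter_match calc_result_list name_list)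

-- ===== LEMMAS AND PROOFS =====

-- canonical form of one of A's phases: scan the names (latest first), return the
-- first filtered row of the first name with a nonempty filter
def ff (crl : List (List String)) (cond : List String → String → Bool) :
    List String → Option (List String)
  | [] => none
  | name :: rest =>
      match crl.filter (fun row => cond row name) with
      | [] => ff crl cond rest
      | r :: _ => some r

theorem loopA_eq_ff (crl : List (List String)) (nl : List String)
    (cond : List String → String → Bool) (il : List Nat) :
    loopA crl nl cond il = ff crl cond (il.map (fun i => nl.getD (nl.length - i - 1) "")) := by
  induction il with
  | nil => rfl
  | cons i rest ih =>
      simp only [loopA, List.map_cons, ff]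
      split <;> simp_all

theorem map_range_reverse (nl : List String) :
    (List.range nl.length).map (fun i => nl.getD (nl.length - i - 1) "") = nl.reverse := by
  apply List.ext_getElem
  · simp
  · intro i h1 h2
    simp only [List.getElem_map, List.getElem_range, List.getElem_reverse]
    simp only [List.length_map, List.length_range] at h1
    rw [List.getD_eq_getElem]
    · congr 1
      omega
    · omega

theorem rank_lt (nl : List String) (cond : List String → String → Bool) (row : List String) :
    rankB nl cond row < (nl.length : Int) := by
  unfold rankB
  have h : ∀ (l : List (Int × String)) (acc : Int), acc < (nl.length : Int) →
      (∀ p ∈ l, p.1 < (nl.length : Int)) →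
      l.foldl (fun acc p => if cond row p.2 then max acc p.1 else acc) acc < (nl.length : Int) := by
    intro l
    induction l with
    | nil => intro acc h1 _; simp only [List.foldl_nil]; exact h1
    | cons p t ih =>
        intro acc h1 h2
        simp only [List.foldl_cons]
        apply ih
        · split
          · have := h2 p (by simp)
            omega
          · exact h1
        · intro q hq; exact h2 q (by simp [hq])
  apply h
  · omega
  · intro p hp
    rw [PySem.List.mem_enumerate_iff] at hp
    obtain ⟨k, hk, rfl⟩ := hp
    simp
    omega

theorem rank_append (ds : List String) (a : String)
    (cond : List String → String → Bool) (row : List String) :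
    rankB (ds ++ [a]) cond row =
      if cond row a then (ds.length : Int) else rankB ds cond row := by
  unfold rankB
  rw [PySem.List.enumerate_append]
  simp only [List.foldl_append, PySem.List.enumerate_cons, PySem.List.enumerate_nil,
    List.foldl_cons, List.foldl_nil]
  have hlt := rank_lt ds cond row
  unfold rankB at hlt
  split
  · omega
  · rfl

-- the fold never updates once every remaining rank is ≤ the accumulator's rank
theorem fold_stay (nl : List String) (cond : List String → String → Bool) :
    ∀ (l : List (List String)) (acc : Int × List String),
      (∀ row ∈ l, rankB nl cond row ≤ acc.1) →
      l.foldl (fun acc row =>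
        let r := rankB nl cond row
        if r > acc.1 then (r, row) else acc) acc = acc := by
  intro l
  induction l with
  | nil => intro acc _; rfl
  | cons row t ih =>
      intro acc h
      simp only [List.foldl_cons]
      have h1 := h row (by simp)
      rw [if_neg (by omega)]
      exact ih acc (fun r hr => h r (by simp [hr]))

theorem fold_hit (ds : List String) (a : String) (cond : List String → String → Bool) :
    ∀ (l : List (List String)) (acc : Int × List String),
      acc.1 < (ds.length : Int) →
      ∀ r t, l.filter (fun row => cond row a) = r :: t →
      l.foldl (fun acc row =>
        let rr := rankB (ds ++ [a]) cond row
        if rr > acc.1 then (rr, row) else acc) acc = ((ds.length : Int), r) := by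
  intro l
  induction l with
  | nil => intro acc _ r t h; simp at h
  | cons row l' ih =>
      intro acc hacc r t hfil
      rw [List.filter_cons] at hfil
      by_cases hc : cond row a
      · simp only [hc, if_pos] at hfil
        obtain ⟨rfl, rfl⟩ : row = r ∧ l'.filter (fun row => cond row a) = t := by
          constructor <;> [exact (List.cons.injEq .. ▸ hfil).1; exact (List.cons.injEq .. ▸ hfil).2]
        simp only [List.foldl_cons]
        rw [rank_append, if_pos hc, if_pos (by omega)]
        apply fold_stay
        intro row' _
        rw [rank_append]
        have := rank_lt ds cond row'
        split <;> omega
      · simp only [hc] at hfil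
        simp only [List.foldl_cons]
        rw [rank_append, if_neg hc]
        have hlt := rank_lt ds cond row
        split
        · exact ih _ (by simpa using hlt) r t (by simpa using hfil)
        · exact ih acc hacc r t (by simpa using hfil)

theorem main_phase (cond : List String → String → Bool) (crl : List (List String)) :
    ∀ (ns : List String),
      ff crl cond ns.reverse =
        (if (bestB crl ns cond).1 ≥ 0 then some (bestB crl ns cond).2 else none) := by
  intro ns
  induction ns using List.reverseRecOn with
  | nil =>
      have h : bestB crl [] cond = (-1, []) := by
        unfold bestB
        apply fold_stay
        intro row _
        simp [rankB, PySem.List.enumerate_nil]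
      simp [ff, h]
  | append_singleton ds a ih =>
      rw [List.reverse_append]
      simp only [List.reverse_singleton, List.singleton_append, ff]
      rcases hfil : crl.filter (fun row => cond row a) with _ | ⟨r, t⟩
      · -- no row matches a: ranks over ds ++ [a] coincide with ranks over ds
        have hnone : ∀ row ∈ crl, cond row a = false := by
          intro row hr
          by_contra hcc
          have : row ∈ crl.filter (fun row => cond row a) := by
            simp [List.mem_filter, hr]; simpa using hcc
          rw [hfil] at this; simp at this
        have hb : bestB crl (ds ++ [a]) cond = bestB crl ds cond := by
          unfold bestB
          apply PySem.List.foldl_congr_mem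
          intro acc row hrow
          simp only [rank_append, hnone row hrow, if_false, Bool.false_eq_true]
        rw [hb, ih]
      · -- some row matches a: the best pair is (ds.length, first matching row)
        have hb : bestB crl (ds ++ [a]) cond = ((ds.length : Int), r) := by
          unfold bestB
          exact fold_hit ds a cond crl (-1, []) (by simp; omega) r t hfil
        rw [hb]
        simp

theorem phase_eq (cond : List String → String → Bool)
    (crl : List (List String)) (nl : List String) :
    loopA crl nl cond (List.range nl.length) =
      (if (bestB crl nl cond).1 ≥ 0 then some (bestB crl nl cond).2 else none) := by
  rw [loopA_eq_ff, map_range_reverse, main_phase]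

theorem ports_agree (crl : List (List String)) (nl : List String) :
    filter_match crl nl = filter_match_alt crl nl := by
  unfold filter_match filter_match_alt
  rw [phase_eq cond1, phase_eq cond2]
  by_cases h1 : (bestB crl nl cond1).1 ≥ 0 <;>
    by_cases h2 : (bestB crl nl cond2).1 ≥ 0 <;>
      simp [h1, h2, ge_iff_le] at *

-- ===== VERDICT (by name: the statement is the Claim_ definition above) =====
theorem filter_match_spec : Claim_equal_filter_match := by
  intro crl nl _ _
  unfold Spec_filter_match
  exact ports_agree crl nl
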